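-- pv_equiv track=rewrite | github.com/sooocong/Algorithm-Study | 프로그래머스/1/42840. 모의고사/모의고사.py | solution
-- ===== SOURCE A (Python) =====
-- def solution(answers):
--     ans = []
--     answer = []
--
--     a = [1, 2, 3, 4, 5]
--     b = [2, 1, 2, 3, 2, 4, 2, 5]
--     c = [3, 3, 1, 1, 2, 2, 4, 4, 5, 5]
--
--     cnt_a, cnt_b, cnt_c = 0, 0, 0
--     for i in range(len(answers)):
--         if answers[i] == a[i % len(a)]:
--             cnt_a += 1
--         if answers[i] == b[i % len(b)]:
--             cnt_b += 1
--         if answers[i] == c[i % len(c)]: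
--             cnt_c += 1
--
--     ans.append(cnt_a)
--     ans.append(cnt_b)
--     ans.append(cnt_c)
--     max_ans = max(ans)
--
--     for i in range(len(ans)):
--         if ans[i] == max_ans:
--             answer.append(i + 1)
--     return answer
-- ===== SOURCE B (Python) =====
-- def solution(answers):
--     patterns = [[1, 2, 3, 4, 5],
--                 [2, 1, 2, 3, 2, 4, 2, 5],
--                 [3, 3, 1, 1, 2, 2, 4, 4, 5, 5]]
--     # Histogram keyed by (position mod 40, answer); 40 = lcm of the pattern
--     # lengths, so each pattern is constant on a residue class mod 40.
--     hist = {}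
--     for i, x in enumerate(answers):
--         key = (i % 40, x)
--         hist[key] = hist.get(key, 0) + 1
--     counts = [sum(hist.get((r, p[r % len(p)]), 0) for r in range(40))
--               for p in patterns]
--     m = max(counts)
--     return [k + 1 for k, c in enumerate(counts) if c == m]
-- ===== Notes on version B (the rewrite author's own statement) =====
-- stated objective: alternative
-- what changed: B never compares answers to patterns element-by-element: it builds a histogram keyed by (index mod 40, answer) in one aggregation pass (40 = lcm of the pattern lengths), then obtains each pattern's score as a sum of 40 bucket lookups, instead of A's single pass updating three match counters per element.
import Mathlib
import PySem

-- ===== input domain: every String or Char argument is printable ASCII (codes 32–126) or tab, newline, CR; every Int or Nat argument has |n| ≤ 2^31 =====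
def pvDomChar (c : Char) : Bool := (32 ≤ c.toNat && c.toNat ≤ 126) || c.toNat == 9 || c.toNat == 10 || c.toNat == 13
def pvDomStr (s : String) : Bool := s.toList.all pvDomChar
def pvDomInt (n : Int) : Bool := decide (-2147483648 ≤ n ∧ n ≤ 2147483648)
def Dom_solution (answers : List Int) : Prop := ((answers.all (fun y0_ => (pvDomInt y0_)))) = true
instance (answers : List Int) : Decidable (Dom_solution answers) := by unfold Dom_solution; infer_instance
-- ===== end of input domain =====

-- B replaces A's per-element comparison against the three patterns by a histogram
-- keyed by (index mod 40, answer) built in one aggregation pass, each pattern's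
-- score then being a sum of 40 bucket lookups; objective: alternative (same cost).

-- ===== PORT A =====
-- indices i come from range(len(answers)) resp. i % len(pattern), hence always in
-- range: pyGetD with default 0 is exact there.  aStep is the literal loop body.
def aStep (answers a b c : List Int) (s : Int × Int × Int) (i : Int) : Int × Int × Int :=
  let s1 := if PySem.List.pyGetD answers i 0 = PySem.List.pyGetD a (PySem.Int.mod i a.length) 0
            then (s.1 + 1, s.2.1, s.2.2) else s
  let s2 := if PySem.List.pyGetD answers i 0 = PySem.List.pyGetD b (PySem.Int.mod i b.length) 0
            then (s1.1, s1.2.1 + 1, s1.2.2) else s1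
  if PySem.List.pyGetD answers i 0 = PySem.List.pyGetD c (PySem.Int.mod i c.length) 0
  then (s2.1, s2.2.1, s2.2.2 + 1) else s2

def solution (answers : List Int) : List Int :=
  let a : List Int := [1, 2, 3, 4, 5]
  let b : List Int := [2, 1, 2, 3, 2, 4, 2, 5]
  let c : List Int := [3, 3, 1, 1, 2, 2, 4, 4, 5, 5]
  let cnt : Int × Int × Int :=
    (PySem.List.pyRange 0 answers.length 1).foldl (aStep answers a b c) (0, 0, 0)
  let ans : List Int := [cnt.1, cnt.2.1, cnt.2.2]
  let maxAns : Int := (PySem.List.max? ans (fun x => x)).getD 0   -- ans is nonempty: max never defaults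
  (PySem.List.pyRange 0 ans.length 1).foldl
    (fun answer i => if PySem.List.pyGetD ans i 0 = maxAns then answer ++ [i + 1] else answer) []

-- ===== PORT B =====
def solution_alt (answers : List Int) : List Int :=
  let patterns : List (List Int) :=
    [[1, 2, 3, 4, 5], [2, 1, 2, 3, 2, 4, 2, 5], [3, 3, 1, 1, 2, 2, 4, 4, 5, 5]]
  -- histogram keyed by (position mod 40, answer); hist.get((r,v),0)+1 then store
  let hist : PySem.Dict (Int × Int) Int :=
    (PySem.List.enumerate answers).foldl
      (fun d ix =>
        let key : Int × Int := (PySem.Int.mod ix.1 40, ix.2)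
        d.insert key (d.getD key 0 + 1))
      PySem.Dict.empty
  let counts : List Int := patterns.map (fun p =>
    ((PySem.List.pyRange 0 40 1).map
      (fun r => hist.getD (r, PySem.List.pyGetD p (PySem.Int.mod r p.length) 0) 0)).sum)
  let m : Int := (PySem.List.max? counts (fun x => x)).getD 0   -- counts is nonempty: max never defaults
  (PySem.List.enumerate counts).filterMap
    (fun ic => if ic.2 = m then some (ic.1 + 1) else none)

-- ===== PRECONDITION & SPEC =====
def Spec_solution (answers : List Int) (out : List Int) : Prop := out = solution_alt answers
instance (answers : List Int) (out : List Int) : Decidable (Spec_solution answers out) := by unfold Spec_solution; infer_instance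

-- ===== CLAIM (what is proved, stated in full; the proofs are below) =====
def Claim_equal_solution : Prop := ∀ (answers : List Int), Dom_solution answers → Spec_solution answers (solution answers)

-- ===== LEMMAS AND PROOFS =====
-- the single-pattern counting step that one component of A's triple loop performs
def stepP (answers p : List Int) (acc i : Int) : Int :=
  if PySem.List.pyGetD answers i 0 = PySem.List.pyGetD p (PySem.Int.mod i p.length) 0 then acc + 1
  else acc

-- pattern value on the residue class r (a proof-only abbreviation)
def qP (p : List Int) (r : Int) : Int := PySem.List.pyGetD p (PySem.Int.mod r p.length) 0

-- the (residue, answer) keys B's histogram is built over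
def keyList (answers : List Int) : List (Int × Int) :=
  (PySem.List.enumerate answers).map (fun ix => (PySem.Int.mod ix.1 40, ix.2))

theorem aStep_eq (answers a b c : List Int) :
    aStep answers a b c = fun s i => (stepP answers a s.1 i, stepP answers b s.2.1 i, stepP answers c s.2.2 i) := by
  funext s i
  simp only [aStep, stepP]
  split_ifs <;> rfl

theorem foldl_triple (f g h : Int → Int → Int) (L : List Int) (x y z : Int) :
    L.foldl (fun s i => (f s.1 i, g s.2.1 i, h s.2.2 i)) (x, y, z) =
      (L.foldl f x, L.foldl g y, L.foldl h z) := by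
  induction L generalizing x y z with
  | nil => rfl
  | cons a t ih => simpa using ih (f x a) (g y a) (h z a)

-- A's per-pattern count as a sum of indicators over enumerate(answers)
theorem countA_eq_sum (p answers : List Int) :
    (PySem.List.pyRange 0 answers.length 1).foldl (stepP answers p) 0 =
      ((PySem.List.enumerate answers).map
        (fun ix => if ix.2 = qP p ix.1 then (1 : Int) else 0)).sum := by
  have hf : stepP answers p = fun acc i =>
      acc + (if PySem.List.pyGetD answers i 0 = qP p i then (1 : Int) else 0) := by
    funext acc i
    simp only [stepP, qP]
    split_ifs <;> simp
  rw [hf, PySem.List.foldl_add]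
  rw [PySem.List.enumerate_eq_map_pyRange (d := 0)]
  simp only [List.map_map, Function.comp_def, PySem.List.len, zero_add]

-- a fold inserting through a key function is the plain counting fold over the mapped list
theorem foldl_insert_key {α κ : Type} [BEq κ] (g : α → κ) (l : List α) (d : PySem.Dict κ Int) :
    l.foldl (fun d x => d.insert (g x) (d.getD (g x) 0 + 1)) d =
      (l.map g).foldl (fun d k => d.insert k (d.getD k 0 + 1)) d := by
  induction l generalizing d with
  | nil => rfl
  | cons a t ih => simp [ih]

-- sum of an indicator of membership over a list
theorem sum_indicator_count (l : List Int) (a : Int) :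
    (l.map (fun r => if r = a then (1 : Int) else 0)).sum = (l.count a : Int) := by
  induction l with
  | nil => simp
  | cons b t ih =>
    by_cases h : b = a <;> simp [h, ih] <;> omega

theorem one_hit (rge : List Int) (q : Int → Int) (x : Int × Int)
    (hnd : rge.Nodup) (hmem : x.1 ∈ rge) :
    (rge.map (fun r => if x = (r, q r) then (1 : Int) else 0)).sum =
      (if x.2 = q x.1 then (1 : Int) else 0) := by
  by_cases hq : x.2 = q x.1
  · have he : ∀ r, (x = (r, q r)) ↔ r = x.1 := by
      intro r
      constructor
      · intro h; exact (congrArg Prod.fst h).symm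
      · intro h; subst h; exact Prod.ext rfl hq
    simp only [he, hq, if_pos]
    rw [sum_indicator_count]
    rw [List.count_eq_one_of_mem hnd hmem]
    rfl
  · have he : ∀ r, ¬ (x = (r, q r)) := by
      intro r h
      exact hq (by rw [congrArg Prod.fst h]; exact congrArg Prod.snd h)
    simp [he, hq]
  
-- counting by residue buckets: summing bucket counts over the residue range
-- recovers the indicator sum over the list itself
theorem sum_count_buckets (rge : List Int) (q : Int → Int) (L : List (Int × Int))
    (hnd : rge.Nodup) (hall : ∀ x ∈ L, x.1 ∈ rge) :
    (rge.map (fun r => (L.count (r, q r) : Int))).sum =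
      (L.map (fun x => if x.2 = q x.1 then (1 : Int) else 0)).sum := by
  induction L with
  | nil => simp
  | cons x t ih =>
    have hx : x.1 ∈ rge := hall x (by simp)
    have ht : ∀ y ∈ t, y.1 ∈ rge := fun y hy => hall y (by simp [hy])
    have hsplit : (rge.map (fun r => ((x :: t).count (r, q r) : Int))).sum =
        (rge.map (fun r => (t.count (r, q r) : Int))).sum +
          (rge.map (fun r => if x = (r, q r) then (1 : Int) else 0)).sum := by
      rw [← List.sum_map_add]
      apply congrArg
      apply List.map_congr_left
      intro r _
      by_cases hxe : x = (r, q r)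
      · simp [hxe]
      · simp [hxe]
    rw [hsplit, ih ht, one_hit rge q x hnd hx]
    simp [add_comm]

theorem final_lists (x y z m : Int) :
    (PySem.List.pyRange 0 3 1).foldl
        (fun answer i => if PySem.List.pyGetD [x, y, z] i 0 = m then answer ++ [i + 1] else answer) [] =
      (PySem.List.enumerate [x, y, z]).filterMap
        (fun ic => if ic.2 = m then some (ic.1 + 1) else none) := by
  have h3 : PySem.List.pyRange 0 3 1 = [0, 1, 2] := by decide
  rw [h3]
  simp [PySem.List.enumerate, PySem.List.pyGetD, List.filterMap_cons]
  split_ifs <;> simp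

-- membership of every histogram key in range(40)
theorem keyList_mem (answers : List Int) :
    ∀ x ∈ keyList answers, x.1 ∈ PySem.List.pyRange 0 40 1 := by
  intro x hx
  simp only [keyList, List.mem_map] at hx
  obtain ⟨ix, _, rfl⟩ := hx
  have h0 : (0 : Int) < 40 := by norm_num
  rw [PySem.List.mem_pyRange_one]
  exact ⟨PySem.Int.mod_nonneg _ h0, PySem.Int.mod_lt _ h0⟩

-- residue collapse: a pattern whose length divides 40 is constant on classes mod 40
theorem qP_mod40 (p : List Int) (hd : (p.length : Int) ∣ 40) (hp : p ≠ []) (i : Int) :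
    qP p (PySem.Int.mod i 40) = qP p i := by
  have hl : (0 : Int) < (p.length : Int) := by
    have := List.length_pos_iff.mpr hp
    exact_mod_cast this
  unfold qP
  rw [PySem.Int.mod_eq_emod_of_pos (show (0:Int) < 40 by norm_num),
      PySem.Int.mod_eq_emod_of_pos hl, PySem.Int.mod_eq_emod_of_pos hl,
      Int.emod_emod_of_dvd _ hd]

-- B's bucket-sum for one pattern equals A's per-pattern count
theorem bucket_eq_countA (p answers : List Int) (hd : (p.length : Int) ∣ 40) (hp : p ≠ []) :
    ((PySem.List.pyRange 0 40 1).map (fun r =>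
        (((PySem.List.enumerate answers).foldl
          (fun d ix =>
            d.insert (PySem.Int.mod ix.1 40, ix.2)
              (d.getD (PySem.Int.mod ix.1 40, ix.2) 0 + 1))
          (PySem.Dict.empty : PySem.Dict (Int × Int) Int)).getD
            (r, PySem.List.pyGetD p (PySem.Int.mod r (p.length : Int)) 0) 0))).sum =
      (PySem.List.pyRange 0 answers.length 1).foldl (stepP answers p) 0 := by
  show ((PySem.List.pyRange 0 40 1).map (fun r =>
      (((PySem.List.enumerate answers).foldl
        (fun d ix =>
          let key : Int × Int := (PySem.Int.mod ix.1 40, ix.2)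
          d.insert key (d.getD key 0 + 1))
        (PySem.Dict.empty : PySem.Dict (Int × Int) Int)).getD (r, qP p r) 0))).sum = _
  have hfold : (PySem.List.enumerate answers).foldl
      (fun d ix =>
        let key : Int × Int := (PySem.Int.mod ix.1 40, ix.2)
        d.insert key (d.getD key 0 + 1))
      (PySem.Dict.empty : PySem.Dict (Int × Int) Int) =
      (keyList answers).foldl (fun d k => d.insert k (d.getD k 0 + 1))
        (PySem.Dict.empty : PySem.Dict (Int × Int) Int) := by
    exact foldl_insert_key (fun ix : Int × Int => (PySem.Int.mod ix.1 40, ix.2)) _ _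
  have hget : ∀ r : Int,
      ((keyList answers).foldl (fun d k => d.insert k (d.getD k 0 + 1))
          (PySem.Dict.empty : PySem.Dict (Int × Int) Int)).getD
        (r, qP p r) 0 = ((keyList answers).count (r, qP p r) : Int) := by
    intro r
    rw [PySem.Dict.getD_foldl_insert_add_one]
    simp
  rw [hfold]
  have hmap : ((PySem.List.pyRange 0 40 1).map (fun r =>
      ((keyList answers).foldl (fun d k => d.insert k (d.getD k 0 + 1))
          (PySem.Dict.empty : PySem.Dict (Int × Int) Int)).getD
        (r, qP p r) 0)) =
      ((PySem.List.pyRange 0 40 1).map (fun r => ((keyList answers).count (r, qP p r) : Int))) := by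
    apply List.map_congr_left
    intro r _
    exact hget r
  rw [hmap]
  rw [sum_count_buckets _ (qP p) _ (by decide) (keyList_mem answers)]
  rw [countA_eq_sum]
  unfold keyList
  rw [List.map_map]
  apply congrArg
  apply List.map_congr_left
  intro ix _
  simp only [Function.comp_def]
  rw [qP_mod40 p hd hp]

theorem solution_eq_alt (answers : List Int) : solution answers = solution_alt answers := by
  simp only [solution, solution_alt, aStep_eq, foldl_triple, List.map_cons, List.map_nil]
  have h1 := bucket_eq_countA [1, 2, 3, 4, 5] answers (by decide) (by decide)
  have h2 := bucket_eq_countA [2, 1, 2, 3, 2, 4, 2, 5] answers (by decide) (by decide)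
  have h3 := bucket_eq_countA [3, 3, 1, 1, 2, 2, 4, 4, 5, 5] answers (by decide) (by decide)
  simp only [h1, h2, h3]
  simp only [List.length_cons, List.length_nil]
  exact final_lists _ _ _ _

-- ===== VERDICT (by name: the statement is the Claim_ definition above) =====
theorem solution_spec : Claim_equal_solution := by
  intro answers _
  unfold Spec_solution
  exact solution_eq_alt answers
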